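-- pv_equiv track=rewrite | github.com/cy-suite/paddlepaddle-new | python/paddle/distributed/auto_parallel/static/utils.py | _coordinate2linear_idx
-- ===== SOURCE A (Python) =====
-- def _coordinate2linear_idx(mesh_shape, coordinate):
--     """
--     convert a coordinate in multidimensional mesh space into a scala idx in linear space.
--
--     it use Row-major order for dimension conversion.
--     so it has:  [most_significant_dim, ..., least_significant_dim]
--     assume:
--
--         the size of i-th dimension to be:  S[i]
--         the index of j-th dimension is: I[j]
--
--     linear_idx of a n dimensional coordinate is:
--
--         I[n-1] * (S[n-2] * S[n-3] * S[n-4] *     ....    S[0]) +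
--         I[n-2] * (         S[n-3] * S[n-4] *     ....    S[0]) +
--         I[n-3] * (                  S[n-4] *     ....    S[0]) +
--         ...
--         I[1]   * (                                       S[0]) +
--         I[0]
--
--     """
--     # NOTE the following function work based on a strong an assumption
--     # that the processes in mesh are
--     #    1. starts from 0
--     #    2. continuous
--     # it will be wrong if ths above condition does not meet,
--     # e.g. process_mesh = { process_groups = [7, 8, 9,10, 12, 13, 14, 15], mesh = [2, 4]}
--     # if you want a more general mapping, you should use cartesian product
--
--     assert len(mesh_shape) == len(
--         coordinate
--     ), f"coordinate should have the same size as mesh shape, but got shape: {mesh_shape}, coordinate: {coordinate}"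
--     for i in range(len(mesh_shape)):
--         assert (
--             coordinate[i] >= 0
--         ), f"index in dimension [{i}] is least than zero. coordinate: {coordinate}"
--         assert (
--             coordinate[i] < mesh_shape[i]
--         ), f"index beyond extent in dimension [{i}]. shape: {mesh_shape}, coordinate: {coordinate}"
--
--     base = mesh_shape[-1]
--     linear_idx = coordinate[-1]
--
--     # row major order
--     for i in range(len(mesh_shape) - 2, -1, -1):
--         linear_idx += base * coordinate[i]
--         base *= mesh_shape[i]
--
--     return linear_idx
-- ===== SOURCE B (Python) =====
-- def _coordinate2linear_idx(mesh_shape, coordinate):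
--     assert len(mesh_shape) == len(
--         coordinate
--     ), f"coordinate should have the same size as mesh shape, but got shape: {mesh_shape}, coordinate: {coordinate}"
--     for i in range(len(mesh_shape)):
--         assert (
--             coordinate[i] >= 0
--         ), f"index in dimension [{i}] is least than zero. coordinate: {coordinate}"
--         assert (
--             coordinate[i] < mesh_shape[i]
--         ), f"index beyond extent in dimension [{i}]. shape: {mesh_shape}, coordinate: {coordinate}"
--     linear_idx = 0
--     for s, c in zip(mesh_shape, coordinate):
--         linear_idx = linear_idx * s + c
--     return linear_idx
-- ===== Notes on version B (the rewrite author's own statement) =====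
-- stated objective: simpler
-- what changed: Replaced the backward loop that maintains a running base product (base *= mesh_shape[i]) with a single forward Horner fold over zip(mesh_shape, coordinate) that maintains only the accumulator.
import Mathlib
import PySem

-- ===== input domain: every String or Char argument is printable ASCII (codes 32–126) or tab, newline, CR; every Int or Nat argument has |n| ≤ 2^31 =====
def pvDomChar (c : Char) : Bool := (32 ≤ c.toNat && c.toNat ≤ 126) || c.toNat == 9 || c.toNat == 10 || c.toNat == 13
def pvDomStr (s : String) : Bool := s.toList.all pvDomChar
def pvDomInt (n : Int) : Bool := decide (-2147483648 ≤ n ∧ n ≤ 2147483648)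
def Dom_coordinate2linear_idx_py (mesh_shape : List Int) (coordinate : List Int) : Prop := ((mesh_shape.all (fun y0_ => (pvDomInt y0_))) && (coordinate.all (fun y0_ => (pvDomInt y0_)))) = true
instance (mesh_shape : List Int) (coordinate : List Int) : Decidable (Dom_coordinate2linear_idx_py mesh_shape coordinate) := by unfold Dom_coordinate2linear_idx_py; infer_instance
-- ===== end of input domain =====

-- B replaces A's backward loop with its running base product by a single forward Horner
-- fold over zip(mesh_shape, coordinate); same value, one accumulator instead of two.

-- ===== PORT A =====
def coordinate2linear_idx_py (mesh_shape : List Int) (coordinate : List Int) : Int :=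
  -- base = mesh_shape[-1]; linear_idx = coordinate[-1]; then the backward loop over
  -- range(len(mesh_shape)-2, -1, -1) carrying the state (linear_idx, base)
  ((PySem.List.pyRange ((mesh_shape.length : Int) - 2) (-1) (-1)).foldl
    (fun (st : Int × Int) i =>
      (st.1 + st.2 * PySem.List.pyGetD coordinate i 0,
       st.2 * PySem.List.pyGetD mesh_shape i 0))
    (PySem.List.pyGetD coordinate (-1) 0, PySem.List.pyGetD mesh_shape (-1) 0)).1

-- ===== PORT B =====
def coordinate2linear_idx_py_alt (mesh_shape : List Int) (coordinate : List Int) : Int :=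
  (mesh_shape.zip coordinate).foldl (fun acc p => acc * p.1 + p.2) 0

-- ===== PRECONDITION & SPEC =====
-- Pre_ excludes exactly the inputs on which A raises: unequal lengths (len assert),
-- an out-of-bounds or negative coordinate (bounds asserts), and the empty mesh
-- (IndexError at mesh_shape[-1]).
def Pre_coordinate2linear_idx_py (mesh_shape : List Int) (coordinate : List Int) : Prop :=
  mesh_shape ≠ [] ∧ mesh_shape.length = coordinate.length ∧
    ∀ p ∈ mesh_shape.zip coordinate, 0 ≤ p.2 ∧ p.2 < p.1
instance (mesh_shape : List Int) (coordinate : List Int) : Decidable (Pre_coordinate2linear_idx_py mesh_shape coordinate) := by unfold Pre_coordinate2linear_idx_py; infer_instance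

def pvWitness_coordinate2linear_idx_py : List Int × List Int := ([2, 3], [1, 2])

def Spec_coordinate2linear_idx_py (mesh_shape : List Int) (coordinate : List Int) (out : Int) : Prop := out = coordinate2linear_idx_py_alt mesh_shape coordinate
instance (mesh_shape : List Int) (coordinate : List Int) (out : Int) : Decidable (Spec_coordinate2linear_idx_py mesh_shape coordinate out) := by unfold Spec_coordinate2linear_idx_py; infer_instance

-- ===== CLAIM (what is proved, stated in full; the proofs are below) =====
def Claim_equal_coordinate2linear_idx_py : Prop := ∀ (mesh_shape : List Int) (coordinate : List Int), Dom_coordinate2linear_idx_py mesh_shape coordinate → Pre_coordinate2linear_idx_py mesh_shape coordinate → Spec_coordinate2linear_idx_py mesh_shape coordinate (coordinate2linear_idx_py mesh_shape coordinate)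

-- ===== LEMMAS AND PROOFS =====

-- Python xs[-1] with default, on a nonempty list, is the last element.
lemma pyGetD_neg_one (xs : List Int) (h : xs ≠ []) :
    PySem.List.pyGetD xs (-1) 0 = xs.getD (xs.length - 1) 0 := by
  unfold PySem.List.pyGetD PySem.List.pyGet? PySem.List.pyIdx?
  cases xs with
  | nil => exact absurd rfl h
  | cons a t =>
    rw [if_neg (by simp)]
    simp [List.getD_eq_getElem?_getD]

-- take (k+1) appends the k-th element (stated via getD to stay proof-friendly).
lemma take_succ_getD (xs : List Int) (k : Nat) (h : k < xs.length) :
    xs.take (k + 1) = xs.take k ++ [xs.getD k 0] := by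
  rw [List.take_add_one]
  simp [List.getElem?_eq_getElem h, List.getD_eq_getElem?_getD]

-- A's backward loop over indices k-1, …, 0 maps state (L, B) to (L + B·H_k, B·P_k), where
-- H_k is the forward Horner value of the first k dimensions and P_k their product.
lemma loopA (s c : List Int) (k : Nat) (hk : k ≤ s.length) (hk2 : k ≤ c.length) (L B : Int) :
    (PySem.List.pyRange ((k : Int) - 1) (-1) (-1)).foldl
      (fun (st : Int × Int) i =>
        (st.1 + st.2 * PySem.List.pyGetD c i 0,
         st.2 * PySem.List.pyGetD s i 0)) (L, B)
    = (L + B * (((s.take k).zip (c.take k)).foldl (fun acc p => acc * p.1 + p.2) 0),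
       B * (s.take k).prod) := by
  induction k generalizing L B with
  | zero =>
    rw [PySem.List.pyRange_neg_one_eq_nil (by norm_num)]
    simp
  | succ k ih =>
    have hks : k < s.length := by omega
    have hkc : k < c.length := by omega
    have hcons : PySem.List.pyRange (((k : Nat) + 1 : Int) - 1) (-1) (-1)
        = ((k : Int)) :: PySem.List.pyRange ((k : Int) - 1) (-1) (-1) := by
      have := PySem.List.pyRange_neg_one_cons (a := ((k : Nat) + 1 : Int) - 1) (b := -1)
        (by omega)
      simpa using this
    push_cast
    rw [hcons, List.foldl_cons]
    rw [PySem.List.pyGetD_natCast, PySem.List.pyGetD_natCast]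
    rw [ih (by omega) (by omega)]
    have hzip : (s.take (k + 1)).zip (c.take (k + 1))
        = (s.take k).zip (c.take k) ++ [(s.getD k 0, c.getD k 0)] := by
      rw [take_succ_getD s k hks, take_succ_getD c k hkc,
        List.zip_append (by simp; omega)]
      simp
    rw [hzip, take_succ_getD s k hks]
    simp
    constructor <;> ring

-- ===== VERDICT (by name: the statement is the Claim_ definition above) =====
theorem coordinate2linear_idx_py_spec : Claim_equal_coordinate2linear_idx_py := by
  intro s c _ hpre
  obtain ⟨hne, hlen, _⟩ := hpre
  unfold Spec_coordinate2linear_idx_py coordinate2linear_idx_py coordinate2linear_idx_py_alt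
  have hn : 1 ≤ s.length := by cases s with | nil => exact absurd rfl hne | cons a t => simp
  have hc : c ≠ [] := by
    intro h; subst h; rw [List.length_nil] at hlen
    exact hne (List.length_eq_zero_iff.mp hlen)
  have h2 : ((s.length : Int) - 2) = ((s.length - 1 : Nat) : Int) - 1 := by
    rw [Nat.cast_sub hn]; push_cast; ring
  rw [h2, loopA s c (s.length - 1) (by omega) (by omega)]
  rw [pyGetD_neg_one s hne, pyGetD_neg_one c hc]
  have hks : s.length - 1 < s.length := by omega
  have hkc : s.length - 1 < c.length := by omega
  have hzip : s.zip c = (s.take (s.length - 1)).zip (c.take (s.length - 1))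
      ++ [(s.getD (s.length - 1) 0, c.getD (s.length - 1) 0)] := by
    have h3 : s.zip c = (s.take (s.length - 1 + 1)).zip (c.take (s.length - 1 + 1)) := by
      rw [Nat.sub_add_cancel hn, List.take_length, List.take_of_length_le (by omega)]
    rw [h3, take_succ_getD s _ hks, take_succ_getD c _ hkc,
      List.zip_append (by simp; omega)]
    simp
  rw [hzip, List.foldl_append]
  have hlc : c.length - 1 = s.length - 1 := by omega
  rw [hlc]
  simp
  ring
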